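-- pv_equiv track=rewrite | github.com/zhoulittlezhou854-max/amazon-listing-skill | modules/scoring.py | _count_compliance_actions
-- ===== SOURCE A (Python) =====
-- from typing import Any, Dict, List, Optional, Sequence, Tuple
--
-- def _count_compliance_actions(audit_trail: Sequence[Dict[str, Any]]) -> Dict[str, int]:
--     counts = {
--         "downgrade": 0,
--         "backend_only": 0,
--         "taboo_skip": 0,
--         "locale_skip": 0,
--         "brand_skip": 0,
--         "constraint_skip": 0,
--         "word_swap": 0,
--     }
--     for entry in audit_trail or []:
--         action = entry.get("action")
--         if action == "backend_only_deferred":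
--             counts["backend_only"] += 1
--             continue
--         if action == "compliance_word_swap":
--             counts["word_swap"] += 1
--             continue
--         if action in counts:
--             counts[action] += 1
--     return counts
-- ===== SOURCE B (Python) =====
-- def _count_compliance_actions(audit_trail):
--     # Stage 1: extract the action of every entry once.
--     actions = [e.get("action") for e in audit_trail or []]
--     # Stage 2: a declarative key -> accepted-action-names table; each result key is
--     # computed by its own counting passes over the extracted action list.
--     spec = [
--         ("downgrade", ("downgrade",)),
--         ("backend_only", ("backend_only", "backend_only_deferred")),
--         ("taboo_skip", ("taboo_skip",)),
--         ("locale_skip", ("locale_skip",)),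
--         ("brand_skip", ("brand_skip",)),
--         ("constraint_skip", ("constraint_skip",)),
--         ("word_swap", ("word_swap", "compliance_word_swap")),
--     ]
--     return {key: sum(actions.count(name) for name in names) for key, names in spec}
-- ===== Notes on version B (the rewrite author's own statement) =====
-- stated objective: alternative
-- what changed: Replaces A's single conditional-accumulation loop over a pre-seeded counts dict by a staged, table-driven shape: extract every entry's action once, then compute each of the seven output keys by its own list.count passes driven by a key-to-accepted-action-names table (the alias names folded in declaratively).
import Mathlib
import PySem

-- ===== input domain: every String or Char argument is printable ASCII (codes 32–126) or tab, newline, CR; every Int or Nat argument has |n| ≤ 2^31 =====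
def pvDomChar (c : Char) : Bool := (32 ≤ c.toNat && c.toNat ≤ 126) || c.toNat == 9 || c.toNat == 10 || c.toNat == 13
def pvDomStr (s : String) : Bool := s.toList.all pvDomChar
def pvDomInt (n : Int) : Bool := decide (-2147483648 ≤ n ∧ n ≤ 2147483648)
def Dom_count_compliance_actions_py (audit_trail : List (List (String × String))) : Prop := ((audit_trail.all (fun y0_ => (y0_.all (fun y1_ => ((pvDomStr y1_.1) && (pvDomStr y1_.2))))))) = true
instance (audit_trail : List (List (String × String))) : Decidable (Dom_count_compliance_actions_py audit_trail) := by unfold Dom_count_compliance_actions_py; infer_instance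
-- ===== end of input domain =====

-- B replaces A's single conditional-accumulation loop by a staged, table-driven shape:
-- extract the actions once, then count each output key via its own list.count passes (objective: alternative).

-- ===== PORT A =====
-- the Python dict literal of seven zeroed counters
def ccaInit : PySem.Dict String Int :=
  PySem.Dict.mk [("downgrade", 0), ("backend_only", 0), ("taboo_skip", 0), ("locale_skip", 0),
                 ("brand_skip", 0), ("constraint_skip", 0), ("word_swap", 0)]

-- one iteration of A's loop body (entry.get("action") = first-match lookup in the assoc list)
def ccaStep (counts : PySem.Dict String Int) (entry : List (String × String)) : PySem.Dict String Int :=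
  let action := entry.lookup "action"
  if action == some "backend_only_deferred" then counts.modify "backend_only" 0 (· + 1)
  else if action == some "compliance_word_swap" then counts.modify "word_swap" 0 (· + 1)
  else match action with
       | some a => if counts.contains a then counts.modify a 0 (· + 1) else counts
       | none => counts

def count_compliance_actions_py (audit_trail : List (List (String × String))) : List (String × Int) :=
  (audit_trail.foldl ccaStep ccaInit).items

-- ===== PORT B =====
-- Source B's key -> accepted-action-names table
def ccaSpecTable : List (String × List String) :=
  [("downgrade", ["downgrade"]),
   ("backend_only", ["backend_only", "backend_only_deferred"]),
   ("taboo_skip", ["taboo_skip"]),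
   ("locale_skip", ["locale_skip"]),
   ("brand_skip", ["brand_skip"]),
   ("constraint_skip", ["constraint_skip"]),
   ("word_swap", ["word_swap", "compliance_word_swap"])]

def count_compliance_actions_py_alt (audit_trail : List (List (String × String))) : List (String × Int) :=
  let actions := audit_trail.map (fun e => e.lookup "action")
  ccaSpecTable.map (fun kn => (kn.1, (kn.2.map (fun n => PySem.List.count actions (some n))).sum))

-- ===== PRECONDITION & SPEC =====
def Spec_count_compliance_actions_py (audit_trail : List (List (String × String))) (out : List (String × Int)) : Prop := out = count_compliance_actions_py_alt audit_trail
instance (audit_trail : List (List (String × String))) (out : List (String × Int)) : Decidable (Spec_count_compliance_actions_py audit_trail out) := by unfold Spec_count_compliance_actions_py; infer_instance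

-- ===== CLAIM (what is proved, stated in full; the proofs are below) =====
def Claim_equal_count_compliance_actions_py : Prop := ∀ (audit_trail : List (List (String × String))), Dom_count_compliance_actions_py audit_trail → Spec_count_compliance_actions_py audit_trail (count_compliance_actions_py audit_trail)

-- ===== LEMMAS AND PROOFS =====

-- the counter dict A maintains, with its seven values exposed
def ccaD (c1 c2 c3 c4 c5 c6 c7 : Int) : PySem.Dict String Int :=
  PySem.Dict.mk [("downgrade", c1), ("backend_only", c2), ("taboo_skip", c3), ("locale_skip", c4),
                 ("brand_skip", c5), ("constraint_skip", c6), ("word_swap", c7)]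

-- number of entries of l whose action is s
def ccaCnt (l : List (List (String × String))) (s : String) : Int :=
  (l.countP (fun e => e.lookup "action" == some s) : Int)

theorem ccaFold (l : List (List (String × String))) (c1 c2 c3 c4 c5 c6 c7 : Int) :
    l.foldl ccaStep (ccaD c1 c2 c3 c4 c5 c6 c7) =
      ccaD (c1 + ccaCnt l "downgrade")
           (c2 + ccaCnt l "backend_only" + ccaCnt l "backend_only_deferred")
           (c3 + ccaCnt l "taboo_skip") (c4 + ccaCnt l "locale_skip")
           (c5 + ccaCnt l "brand_skip") (c6 + ccaCnt l "constraint_skip")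
           (c7 + ccaCnt l "word_swap" + ccaCnt l "compliance_word_swap") := by
  induction l generalizing c1 c2 c3 c4 c5 c6 c7 with
  | nil => simp [ccaCnt]
  | cons e t ih =>
    rw [List.foldl_cons]
    rcases ha : e.lookup "action" with _ | a
    · have hs : ccaStep (ccaD c1 c2 c3 c4 c5 c6 c7) e = ccaD c1 c2 c3 c4 c5 c6 c7 := by
        simp only [ccaStep, ha]; rfl
      rw [hs, ih]
      simp [ccaCnt, ha]
    · by_cases h1 : a = "backend_only_deferred"
      · subst h1
        have hs : ccaStep (ccaD c1 c2 c3 c4 c5 c6 c7) e = ccaD c1 (c2+1) c3 c4 c5 c6 c7 := by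
          simp only [ccaStep, ha]; rfl
        rw [hs, ih]
        simp [ccaD, ccaCnt, ha]
        omega
      · by_cases h2 : a = "compliance_word_swap"
        · subst h2
          have hs : ccaStep (ccaD c1 c2 c3 c4 c5 c6 c7) e = ccaD c1 c2 c3 c4 c5 c6 (c7+1) := by
            simp only [ccaStep, ha]; rfl
          rw [hs, ih]
          simp [ccaD, ccaCnt, ha]
          omega
        · by_cases h3 : a = "downgrade"
          · subst h3
            have hs : ccaStep (ccaD c1 c2 c3 c4 c5 c6 c7) e = ccaD (c1+1) c2 c3 c4 c5 c6 c7 := by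
              simp only [ccaStep, ha]; rfl
            rw [hs, ih]
            simp [ccaD, ccaCnt, ha]
            omega
          · by_cases h4 : a = "backend_only"
            · subst h4
              have hs : ccaStep (ccaD c1 c2 c3 c4 c5 c6 c7) e = ccaD c1 (c2+1) c3 c4 c5 c6 c7 := by
                simp only [ccaStep, ha]; rfl
              rw [hs, ih]
              simp [ccaD, ccaCnt, ha]
              omega
            · by_cases h5 : a = "taboo_skip"
              · subst h5
                have hs : ccaStep (ccaD c1 c2 c3 c4 c5 c6 c7) e = ccaD c1 c2 (c3+1) c4 c5 c6 c7 := by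
                  simp only [ccaStep, ha]; rfl
                rw [hs, ih]
                simp [ccaD, ccaCnt, ha]
                omega
              · by_cases h6 : a = "locale_skip"
                · subst h6
                  have hs : ccaStep (ccaD c1 c2 c3 c4 c5 c6 c7) e = ccaD c1 c2 c3 (c4+1) c5 c6 c7 := by
                    simp only [ccaStep, ha]; rfl
                  rw [hs, ih]
                  simp [ccaD, ccaCnt, ha]
                  omega
                · by_cases h7 : a = "brand_skip"
                  · subst h7
                    have hs : ccaStep (ccaD c1 c2 c3 c4 c5 c6 c7) e = ccaD c1 c2 c3 c4 (c5+1) c6 c7 := by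
                      simp only [ccaStep, ha]; rfl
                    rw [hs, ih]
                    simp [ccaD, ccaCnt, ha]
                    omega
                  · by_cases h8 : a = "constraint_skip"
                    · subst h8
                      have hs : ccaStep (ccaD c1 c2 c3 c4 c5 c6 c7) e = ccaD c1 c2 c3 c4 c5 (c6+1) c7 := by
                        simp only [ccaStep, ha]; rfl
                      rw [hs, ih]
                      simp [ccaD, ccaCnt, ha]
                      omega
                    · by_cases h9 : a = "word_swap"
                      · subst h9
                        have hs : ccaStep (ccaD c1 c2 c3 c4 c5 c6 c7) e = ccaD c1 c2 c3 c4 c5 c6 (c7+1) := by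
                          simp only [ccaStep, ha]; rfl
                        rw [hs, ih]
                        simp [ccaD, ccaCnt, ha]
                        omega
                      · have hs : ccaStep (ccaD c1 c2 c3 c4 c5 c6 c7) e = ccaD c1 c2 c3 c4 c5 c6 c7 := by
                          simp [ccaStep, ccaD, ha, h1, h2, Ne.symm h3, Ne.symm h4, Ne.symm h5, Ne.symm h6, Ne.symm h7, Ne.symm h8, Ne.symm h9]
                        rw [hs, ih]
                        simp [ccaCnt, ha, h1, h2, h3, h4, h5, h6, h7, h8, h9]

-- ===== VERDICT (by name: the statement is the Claim_ definition above) =====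
theorem count_compliance_actions_py_spec : Claim_equal_count_compliance_actions_py := by
  intro l _
  unfold Spec_count_compliance_actions_py count_compliance_actions_py count_compliance_actions_py_alt
  show (l.foldl ccaStep (ccaD 0 0 0 0 0 0 0)).items = _
  rw [ccaFold]
  simp [ccaD, ccaCnt, ccaSpecTable, PySem.List.count, List.count_eq_countP, List.countP_map, Function.comp_def]
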